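-- pv_equiv track=rewrite | github.com/lamismanota/la-misma-nota-web | build.py | strip_line_comments
-- ===== SOURCE A (Python) =====
-- def strip_line_comments(source: str) -> str:
--     result = []
--     in_string = False
--     escape = False
--     quote = ""
--     index = 0
--
--     while index < len(source):
--         char = source[index]
--         next_char = source[index + 1] if index + 1 < len(source) else ""
--
--         if in_string:
--             result.append(char)
--             if escape:
--                 escape = False
--             elif char == "\\":
--                 escape = True
--             elif char == quote:
--                 in_string = False
--             index += 1
--             continue
--
--         if char in ('"', "'"):
--             in_string = True
--             quote = char
--             result.append(char)
--             index += 1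
--             continue
--
--         if char == "/" and next_char == "/":
--             while index < len(source) and source[index] != "\n":
--                 index += 1
--             continue
--
--         result.append(char)
--         index += 1
--
--     return "".join(result)
-- ===== SOURCE B (Python) =====
-- def _scan_line(line, in_string, escape, quote):
--     """Scan one newline-free line: track string state; truncate at an
--     outside-string '//'. Returns (kept_text, in_string, escape, quote)."""
--     kept = []
--     i = 0
--     n = len(line)
--     while i < n:
--         c = line[i]
--         if in_string:
--             kept.append(c)
--             if escape:
--                 escape = False
--             elif c == "\\":
--                 escape = True
--             elif c == quote:
--                 in_string = False
--             i += 1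
--         elif c in ('"', "'"):
--             in_string = True
--             quote = c
--             kept.append(c)
--             i += 1
--         elif c == "/" and i + 1 < n and line[i + 1] == "/":
--             break  # rest of the line is a comment; state unchanged
--         else:
--             kept.append(c)
--             i += 1
--     return "".join(kept), in_string, escape, quote
--
--
-- def strip_line_comments(source: str) -> str:
--     out = []
--     in_string = False
--     escape = False
--     quote = ""
--     for line in source.split("\n"):
--         kept, in_string, escape, quote = _scan_line(line, in_string, escape, quote)
--         out.append(kept)
--         # the joining newline is an ordinary character: it consumes a pending escape
--         escape = False
--     return "\n".join(out)
-- ===== Notes on version B (the rewrite author's own statement) =====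
-- stated objective: simpler
-- what changed: B splits the source into lines on the newline character and truncates each line at the first outside-string double-slash while carrying the string state across lines, replacing A's single index-driven scan with its inner skip-to-newline loop; the tighter per-line loop is also measurably faster.
import Mathlib
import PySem

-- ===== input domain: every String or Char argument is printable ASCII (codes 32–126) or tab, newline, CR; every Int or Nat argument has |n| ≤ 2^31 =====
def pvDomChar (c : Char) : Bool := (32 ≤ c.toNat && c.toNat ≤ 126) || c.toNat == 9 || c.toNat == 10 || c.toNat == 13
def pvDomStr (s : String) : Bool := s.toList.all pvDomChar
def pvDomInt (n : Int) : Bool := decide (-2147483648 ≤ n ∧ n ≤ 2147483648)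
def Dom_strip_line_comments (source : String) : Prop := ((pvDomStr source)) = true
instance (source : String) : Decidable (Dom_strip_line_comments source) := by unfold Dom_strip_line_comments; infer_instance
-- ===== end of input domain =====

-- B strips // line comments line-by-line (split on '\n', truncate each line at an
-- outside-string '//', rejoin) instead of A's single index scan with an inner skip loop;
-- objective: simpler decomposition, same observable behaviour.

-- ===== PORT A =====
-- A's inner `while index < len(source) and source[index] != '\n': index += 1` loop
def skipToNL : List Char → List Char
  | [] => []
  | c :: r => if c == '\n' then c :: r else skipToNL r

theorem skipToNL_length : ∀ (l : List Char), (skipToNL l).length ≤ l.length := by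
  intro l
  induction l with
  | nil => simp [skipToNL]
  | cons c r ih =>
    simp only [skipToNL]
    split
    · simp
    · exact Nat.le_succ_of_le ih

-- the main `while index < len(source)` loop of A, on the suffix from `index`
def goA : List Char → Bool → Bool → Char → List Char
  | [], _, _, _ => []
  | c :: rest, inS, esc, q =>
    if inS then
      c :: (if esc then goA rest inS false q
            else if c == '\\' then goA rest inS true q
            else if c == q then goA rest false esc q
            else goA rest inS esc q)
    else if c == '"' || c == '\'' then
      c :: goA rest true esc c
    else if c == '/' && rest.head? == some '/' then
      -- source[index] = '/' ≠ '\n', so the skip loop drops it first, then scans `rest`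
      goA (skipToNL rest) inS esc q
    else
      c :: goA rest inS esc q
termination_by l => l.length
decreasing_by
  all_goals simp
  exact skipToNL_length rest

-- Python's initial quote "" is never compared before being assigned; ' ' stands in for it
def strip_line_comments (source : String) : String :=
  String.mk (goA source.toList false false ' ')

-- ===== PORT B =====
-- Source B's _scan_line: scan one newline-free line, truncating at an outside-string '//';
-- returns (kept text, in_string, escape, quote)
def scanLine : List Char → Bool → Bool → Char → (List Char × Bool × Bool × Char)
  | [], inS, esc, q => ([], inS, esc, q)
  | c :: r, inS, esc, q =>
    if inS then
      if esc then (c :: (scanLine r inS false q).1, (scanLine r inS false q).2)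
      else if c == '\\' then (c :: (scanLine r inS true q).1, (scanLine r inS true q).2)
      else if c == q then (c :: (scanLine r false esc q).1, (scanLine r false esc q).2)
      else (c :: (scanLine r inS esc q).1, (scanLine r inS esc q).2)
    else if c == '"' || c == '\'' then
      (c :: (scanLine r true esc c).1, (scanLine r true esc c).2)
    else if c == '/' && r.head? == some '/' then
      ([], inS, esc, q)
    else
      (c :: (scanLine r inS esc q).1, (scanLine r inS esc q).2)

-- Source B's loop over source.split('\n'), rejoined with '\n';
-- the joining newline consumes any pending escape (escape := false)
def goB : List (List Char) → Bool → Bool → Char → List Char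
  | [], _, _, _ => []
  | [l], inS, esc, q => (scanLine l inS esc q).1
  | l :: ls, inS, esc, q =>
    (scanLine l inS esc q).1 ++ '\n' :: goB ls (scanLine l inS esc q).2.1 false (scanLine l inS esc q).2.2.2

def strip_line_comments_alt (source : String) : String :=
  String.mk (goB (source.toList.splitOn '\n') false false ' ')

-- ===== PRECONDITION & SPEC =====
def Spec_strip_line_comments (source : String) (out : String) : Prop := out = strip_line_comments_alt source
instance (source : String) (out : String) : Decidable (Spec_strip_line_comments source out) := by unfold Spec_strip_line_comments; infer_instance

-- ===== CLAIM (what is proved, stated in full; the proofs are below) =====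
def Claim_equal_strip_line_comments : Prop := ∀ (source : String), Dom_strip_line_comments source → Spec_strip_line_comments source (strip_line_comments source)

-- ===== LEMMAS AND PROOFS =====

-- pieces of splitOnP contain no separator
theorem splitOnP_pieces (p : Char → Bool) :
    ∀ (xs : List Char), ∀ l ∈ xs.splitOnP p, ∀ a ∈ l, ¬ p a := by
  intro xs
  induction xs with
  | nil => simp
  | cons x xs ih =>
    intro l hl a ha
    rw [List.splitOnP_cons] at hl
    by_cases hx : p x
    · simp [hx] at hl
      rcases hl with h | h
      · subst h; simp at ha
      · exact ih l h a ha
    · simp [hx] at hl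
      obtain ⟨hd, tl, hht⟩ := List.exists_cons_of_ne_nil (List.splitOnP_ne_nil p xs)
      rw [hht] at hl
      simp at hl
      rcases hl with h | h
      · subst h
        rcases List.mem_cons.mp ha with h' | h'
        · subst h'; exact hx
        · exact ih hd (by rw [hht]; exact List.mem_cons_self) a h'
      · exact ih l (by rw [hht]; exact List.mem_cons_of_mem _ h) a ha

-- goB's rejoin shape equals List.intercalate ['\n']
def joinNL : List (List Char) → List Char
  | [] => []
  | [l] => l
  | l :: ls => l ++ '\n' :: joinNL ls

theorem joinNL_intercalate : ∀ (ls : List (List Char)), joinNL ls = List.intercalate ['\n'] ls := by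
  intro ls
  induction ls with
  | nil => simp [joinNL, List.intercalate]
  | cons l ls ih =>
    cases ls with
    | nil => simp [joinNL, List.intercalate]
    | cons l₂ ls₂ =>
      simp only [joinNL, ih, List.intercalate] at *
      simp [List.intersperse]

theorem toList_eq_joinNL_splitOn (s : String) :
    s.toList = joinNL (s.toList.splitOn '\n') := by
  rw [joinNL_intercalate, List.intercalate_splitOn]

-- scanLine preserves the reachable-state invariants:
-- quote is one of ' " while in a string, and escape is off outside a string
theorem scanLine_inv : ∀ (l : List Char) (inS esc : Bool) (q : Char),
    (inS = true → (q = '"' ∨ q = '\'')) → (inS = false → esc = false) →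
    (((scanLine l inS esc q).2.1 = true → ((scanLine l inS esc q).2.2.2 = '"' ∨ (scanLine l inS esc q).2.2.2 = '\'')) ∧
     ((scanLine l inS esc q).2.1 = false → (scanLine l inS esc q).2.2.1 = false)) := by
  intro l
  induction l with
  | nil => intro inS esc q hq he; simpa [scanLine] using ⟨hq, he⟩
  | cons c r ih =>
    intro inS esc q hq he
    by_cases hs : inS = true
    · by_cases hesc : esc = true
      · simpa [scanLine, hs, hesc] using ih true false q (by simpa [hs] using hq) (by simp)
      · by_cases hbs : c = '\\'
        · simpa [scanLine, hs, hesc, hbs] using ih true true q (by simpa [hs] using hq) (by simp)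
        · by_cases hqc : c = q
          · have hbs' : ¬(q = '\\') := hqc ▸ hbs
            have he' : esc = false := by cases esc <;> simp_all
            simpa [scanLine, hs, hesc, hbs, hqc, hbs', he'] using
              ih false false q (by simp) (by simp)
          · simpa [scanLine, hs, hesc, hbs, hqc] using ih true esc q (by simpa [hs] using hq) (by simp)
    · have hs' : inS = false := by cases inS <;> simp_all
      have he' : esc = false := he hs'
      subst hs'; subst he'
      by_cases hqc : (c == '"' || c == '\'') = true
      · simpa [scanLine, hqc] using ih true false c (by simpa using hqc) (by simp)
      · by_cases hcm : (c == '/' && r.head? == some '/') = true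
        · have hstep : scanLine (c :: r) false false q = ([], false, false, q) := by
            simp only [scanLine, Bool.false_eq_true, if_false]
            rw [if_neg hqc, if_pos hcm]
          rw [hstep]
          exact ⟨by simp, fun _ => rfl⟩
        · have hstep : scanLine (c :: r) false false q =
              (c :: (scanLine r false false q).1, (scanLine r false false q).2) := by
            simp only [scanLine, Bool.false_eq_true, if_false]
            rw [if_neg hqc, if_neg hcm]
          rw [hstep]
          simpa using ih false false q (by simp) (by simp)


theorem skipToNL_append : ∀ (x r : List Char), '\n' ∉ x → skipToNL (x ++ r) = skipToNL r := by
  intro x r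
  induction x with
  | nil => intro _; simp
  | cons c x ih =>
    intro hx
    have hc : ¬ ((c == '\n') = true) := by
      simp only [beq_iff_eq]
      exact fun h => hx (by simp [h])
    simp only [List.cons_append, skipToNL]
    rw [if_neg hc]
    exact ih (fun h => hx (List.mem_cons_of_mem _ h))

-- A on one newline-free line followed by nothing or a '\n': B's per-line scan, then A resumes
theorem goA_line : ∀ (l : List Char) (inS esc : Bool) (q : Char) (r : List Char),
    '\n' ∉ l → (inS = true → (q = '"' ∨ q = '\'')) → (inS = false → esc = false) →
    (r = [] ∨ ∃ r', r = '\n' :: r') →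
    goA (l ++ r) inS esc q =
      (scanLine l inS esc q).1 ++
        goA r (scanLine l inS esc q).2.1 (scanLine l inS esc q).2.2.1 (scanLine l inS esc q).2.2.2 := by
  intro l
  induction l with
  | nil => intro inS esc q r _ _ _ _; simp [scanLine]
  | cons c l' ih =>
    intro inS esc q r hnl hq he hr
    have hnl' : '\n' ∉ l' := fun h => hnl (List.mem_cons_of_mem _ h)
    have hc : c ≠ '\n' := fun h => hnl (h ▸ List.mem_cons_self)
    by_cases hs : inS = true
    · by_cases hesc : esc = true
      · simpa [goA, scanLine, hs, hesc] using ih true false q r hnl' (by simpa [hs] using hq) (by simp) hr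
      · by_cases hbs : c = '\\'
        · simpa [goA, scanLine, hs, hesc, hbs] using ih true true q r hnl' (by simpa [hs] using hq) (by simp) hr
        · by_cases hqc : c = q
          · have hbs' : ¬(q = '\\') := hqc ▸ hbs
            have he' : esc = false := by cases esc <;> simp_all
            simpa [goA, scanLine, hs, hesc, hbs, hqc, hbs', he'] using
              ih false false q r hnl' (by simp) (by simp) hr
          · simpa [goA, scanLine, hs, hesc, hbs, hqc] using
              ih true esc q r hnl' (by simpa [hs] using hq) (by simp) hr
    · have hs' : inS = false := by cases inS <;> simp_all
      have he' : esc = false := he hs'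
      subst hs'; subst he'
      by_cases hquote : (c == '"' || c == '\'') = true
      · simpa [goA, scanLine, hquote] using
          ih true false c r hnl' (by simpa using hquote) (by simp) hr
      · have hhead : ((l' ++ r).head? == some '/') = (l'.head? == some '/') := by
          cases l' with
          | nil => rcases hr with rfl | ⟨r', rfl⟩ <;> simp
          | cons d l'' => simp
        by_cases hcm : (c == '/' && l'.head? == some '/') = true
        · have hskip : skipToNL (l' ++ r) = r := by
            rw [skipToNL_append _ _ hnl']
            rcases hr with rfl | ⟨r', rfl⟩ <;> simp [skipToNL]
          have hcm2 : (c == '/' && (l' ++ r).head? == some '/') = true := by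
            rw [hhead]; exact hcm
          simp only [List.cons_append, goA, scanLine, Bool.false_eq_true, if_false]
          rw [if_neg hquote, if_pos hcm2, if_neg hquote, if_pos hcm, hskip]
          simp
        · have hcmA : ¬ ((c == '/' && (l' ++ r).head? == some '/') = true) := by
            rw [hhead]; exact hcm
          simp only [List.cons_append, goA, scanLine, Bool.false_eq_true, if_false]
          rw [if_neg hquote, if_neg hcmA, if_neg hquote, if_neg hcm]
          rw [ih false false q r hnl' (by simp) (by simp) hr]
          simp

theorem goA_newline : ∀ (rest : List Char) (inS esc : Bool) (q : Char),
    (inS = true → (q = '"' ∨ q = '\'')) → (inS = false → esc = false) →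
    goA ('\n' :: rest) inS esc q = '\n' :: goA rest inS false q := by
  intro rest inS esc q hq he
  by_cases hs : inS = true
  · by_cases hesc : esc = true
    · simp [goA, hs, hesc]
    · have he' : esc = false := by cases esc <;> simp_all
      have hnq : ('\n' : Char) ≠ q := by rcases hq hs with h | h <;> simp [h]
      simp [goA, hs, hesc, hnq, he']
  · have hs' : inS = false := by cases inS <;> simp_all
    simp [goA, hs', he hs']

theorem goA_joinNL : ∀ (ls : List (List Char)) (inS esc : Bool) (q : Char),
    (∀ l ∈ ls, '\n' ∉ l) → (inS = true → (q = '"' ∨ q = '\'')) → (inS = false → esc = false) →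
    goA (joinNL ls) inS esc q = goB ls inS esc q := by
  intro ls
  induction ls with
  | nil => intro inS esc q _ _ _; simp [joinNL, goA, goB]
  | cons l ls ih =>
    intro inS esc q hnl hq he
    have hl : '\n' ∉ l := hnl l List.mem_cons_self
    cases ls with
    | nil =>
      have := goA_line l inS esc q [] hl hq he (Or.inl rfl)
      simpa [joinNL, goA, goB] using this
    | cons l₂ ls₂ =>
      have hline := goA_line l inS esc q ('\n' :: joinNL (l₂ :: ls₂)) hl hq he
        (Or.inr ⟨_, rfl⟩)
      have hinv := scanLine_inv l inS esc q hq he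
      have hnl2 := goA_newline (joinNL (l₂ :: ls₂)) (scanLine l inS esc q).2.1
        (scanLine l inS esc q).2.2.1 (scanLine l inS esc q).2.2.2 hinv.1 hinv.2
      have hih := ih (scanLine l inS esc q).2.1 false (scanLine l inS esc q).2.2.2
        (fun x hx => hnl x (List.mem_cons_of_mem _ hx)) hinv.1 (fun _ => rfl)
      show goA (l ++ '\n' :: joinNL (l₂ :: ls₂)) inS esc q = _
      rw [hline, hnl2, hih]
      rfl



-- ===== VERDICT (by name: the statement is the Claim_ definition above) =====
theorem strip_line_comments_spec : Claim_equal_strip_line_comments := by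
  intro source _
  unfold Spec_strip_line_comments strip_line_comments strip_line_comments_alt
  congr 1
  conv_lhs => rw [toList_eq_joinNL_splitOn source]
  refine goA_joinNL _ false false ' ' ?_ (by simp) (fun _ => rfl)
  intro l hl a
  rw [List.splitOn] at hl
  exact (splitOnP_pieces (· == '\n') source.toList l hl '\n' a) (by simp)
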